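-- pv_equiv track=rewrite | github.com/cat-mcs/Burnside-nRooks | chessboard.py | involution
-- ===== SOURCE A (Python) =====
-- def involution(num):
--
--     m = 0
--     j = 1
--     k = 0
--
--     if num == 0 or num == 1:
--         return 1
--
--     i = [1,1]
--     while m < num:
--         InvNo = i[j] + m*i[k]
--         i.append(InvNo)
--         j += 1
--         k += 1
--         m=m+1
--     return i[-1]
-- ===== SOURCE B (Python) =====
-- def involution(num):
--     # Closed-form: sum over k (number of 2-cycles) of C(num, 2k) * (2k-1)!!,
--     # computed with a running term (exact integer division at each step).
--     if num < 2:
--         return 1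
--     total = 1
--     term = 1
--     for k in range(1, num // 2 + 1):
--         term = term * (num - 2 * k + 2) * (num - 2 * k + 1) // (2 * k)
--         total += term
--     return total
-- ===== Notes on version B (the rewrite author's own statement) =====
-- stated objective: alternative
-- what changed: Replaces the list-building two-term recurrence with the closed-form sum over the number of 2-cycles, sum_k C(num,2k)*(2k-1)!!, accumulated with a running multiplicative term.
import Mathlib
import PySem

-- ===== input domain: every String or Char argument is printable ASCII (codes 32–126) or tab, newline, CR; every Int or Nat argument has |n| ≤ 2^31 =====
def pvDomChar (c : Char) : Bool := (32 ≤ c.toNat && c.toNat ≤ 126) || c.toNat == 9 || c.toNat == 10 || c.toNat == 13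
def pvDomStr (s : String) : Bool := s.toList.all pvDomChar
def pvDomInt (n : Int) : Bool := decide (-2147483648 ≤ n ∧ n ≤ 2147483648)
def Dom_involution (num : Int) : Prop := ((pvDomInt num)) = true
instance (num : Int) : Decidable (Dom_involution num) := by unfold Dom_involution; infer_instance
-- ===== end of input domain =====

-- B computes the same involution numbers by the closed-form sum over the number of 2-cycles
-- instead of A's list-building two-term recurrence (objective: alternative algorithm).

-- ===== PORT A =====
-- while m < num: append i[j] + m*i[k]; j,k,m += 1   (fuel = num.toNat makes the loop total; the
-- condition m < num is still tested each step, and indices are always in range so getD 0 is never used)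
def involutionLoop (num : Int) : Nat → List Int → Int → Int → Int → List Int
  | 0, i, _, _, _ => i
  | f + 1, i, j, k, m =>
    if m < num then
      involutionLoop num f (i ++ [PySem.List.pyGetD i j 0 + m * PySem.List.pyGetD i k 0]) (j + 1) (k + 1) (m + 1)
    else i

def involution (num : Int) : Int :=
  if num == 0 || num == 1 then 1
  else
    let i := involutionLoop num num.toNat [1, 1] 1 0 0
    PySem.List.pyGetD i (-1) 0

-- ===== PORT B =====
def involution_alt (num : Int) : Int :=
  if num < 2 then 1
  else
    (((PySem.List.pyRange 1 (PySem.Int.floordiv num 2 + 1) 1).foldl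
      (fun (p : Int × Int) k =>
        let term := PySem.Int.floordiv (p.2 * (num - 2 * k + 2) * (num - 2 * k + 1)) (2 * k)
        (p.1 + term, term)) (1, 1))).1

-- ===== PRECONDITION & SPEC =====
def Spec_involution (num : Int) (out : Int) : Prop := out = involution_alt num
instance (num : Int) (out : Int) : Decidable (Spec_involution num out) := by unfold Spec_involution; infer_instance

-- ===== CLAIM (what is proved, stated in full; the proofs are below) =====
def Claim_equal_involution : Prop := ∀ (num : Int), Dom_involution num → Spec_involution num (involution num)

-- ===== LEMMAS AND PROOFS =====

-- the involution numbers by their standard recurrence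
def invN : Nat → Nat
  | 0 => 1
  | 1 => 1
  | n + 2 => invN (n + 1) + (n + 1) * invN n

-- dd k = (2k-1)!! , the number of perfect matchings of 2k points
def dd : Nat → Nat
  | 0 => 1
  | k + 1 => (2 * k + 1) * dd k

-- T n k = C(n, 2k) * (2k-1)!! : involutions of n elements with exactly k 2-cycles
def TT (n k : Nat) : Nat := n.choose (2 * k) * dd k

-- full-range sum (terms with 2k > n vanish)
def SS (n : Nat) : Nat := ∑ k ∈ Finset.range (n + 1), TT n k

lemma TT_zero (n : Nat) : TT n 0 = 1 := by simp [TT, dd]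

lemma TT_eq_zero {n k : Nat} (h : n < 2 * k) : TT n k = 0 := by
  simp [TT, Nat.choose_eq_zero_of_lt h]

lemma TT_step (n k : Nat) :
    TT n k * ((n - 2 * k) * (n - 2 * k - 1)) = 2 * (k + 1) * TT n (k + 1) := by
  have h1 := Nat.choose_succ_right_eq n (2 * k)
  have h2 := Nat.choose_succ_right_eq n (2 * k + 1)
  have : n.choose (2 * k + 2) * ((2 * k + 2) * (2 * k + 1)) =
      n.choose (2 * k) * ((n - 2 * k) * (n - (2 * k + 1))) := by
    calc n.choose (2 * k + 2) * ((2 * k + 2) * (2 * k + 1))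
        = (n.choose (2 * k + 2) * (2 * k + 2)) * (2 * k + 1) := by ring
      _ = (n.choose (2 * k + 1) * (n - (2 * k + 1))) * (2 * k + 1) := by rw [h2]
      _ = (n.choose (2 * k + 1) * (2 * k + 1)) * (n - (2 * k + 1)) := by ring
      _ = (n.choose (2 * k) * (n - 2 * k)) * (n - (2 * k + 1)) := by rw [h1]
      _ = n.choose (2 * k) * ((n - 2 * k) * (n - (2 * k + 1))) := by ring
  have hsub : n - (2 * k + 1) = n - 2 * k - 1 := by omega
  simp only [TT, dd]
  calc n.choose (2 * k) * dd k * ((n - 2 * k) * (n - 2 * k - 1))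
      = n.choose (2 * k) * ((n - 2 * k) * (n - (2 * k + 1))) * dd k := by rw [hsub]; ring
    _ = n.choose (2 * k + 2) * ((2 * k + 2) * (2 * k + 1)) * dd k := by rw [this]
    _ = 2 * (k + 1) * (n.choose (2 * (k + 1)) * ((2 * k + 1) * dd k)) := by
        have : 2 * (k + 1) = 2 * k + 2 := by ring
        rw [this]; ring_nf

lemma SS_zero : SS 0 = 1 := by decide
lemma SS_one : SS 1 = 1 := by decide

lemma TT_key (n k : Nat) : TT (n + 2) (k + 1) = TT (n + 1) (k + 1) + (n + 1) * TT n k := by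
  have hc : (n + 2).choose (2 * k + 2) = (n + 1).choose (2 * k + 1) + (n + 1).choose (2 * k + 2) :=
    Nat.choose_succ_succ (n + 1) (2 * k + 1)
  have hm : (n + 1) * n.choose (2 * k) = (n + 1).choose (2 * k + 1) * (2 * k + 1) :=
    Nat.add_one_mul_choose_eq n (2 * k)
  simp only [TT, dd]
  rw [show 2 * (k + 1) = 2 * k + 2 from by ring, hc]
  calc ((n + 1).choose (2 * k + 1) + (n + 1).choose (2 * k + 2)) * ((2 * k + 1) * dd k)
      = (n + 1).choose (2 * k + 2) * ((2 * k + 1) * dd k)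
        + ((n + 1).choose (2 * k + 1) * (2 * k + 1)) * dd k := by ring
    _ = (n + 1).choose (2 * k + 2) * ((2 * k + 1) * dd k) + ((n + 1) * n.choose (2 * k)) * dd k := by
        rw [← hm]
    _ = (n + 1).choose (2 * k + 2) * ((2 * k + 1) * dd k) + (n + 1) * (n.choose (2 * k) * dd k) := by
        ring

lemma SS_rec (n : Nat) : SS (n + 2) = SS (n + 1) + (n + 1) * SS n := by
  unfold SS
  rw [Finset.sum_range_succ' (fun k => TT (n + 2) k) (n + 2)]
  simp only [TT_key, TT_zero]
  rw [Finset.sum_add_distrib]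
  have e1 : (∑ k ∈ Finset.range (n + 2), TT (n + 1) (k + 1)) + 1
      = ∑ k ∈ Finset.range (n + 2), TT (n + 1) k := by
    have h3 := Finset.sum_range_succ' (fun k => TT (n + 1) k) (n + 2)
    have h4 := Finset.sum_range_succ (fun k => TT (n + 1) k) (n + 2)
    rw [TT_zero] at h3
    rw [TT_eq_zero (show n + 1 < 2 * (n + 2) from by omega)] at h4
    omega
  have e2 : (∑ k ∈ Finset.range (n + 2), (n + 1) * TT n k)
      = (n + 1) * ∑ k ∈ Finset.range (n + 1), TT n k := by
    rw [← Finset.mul_sum]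
    congr 1
    rw [Finset.sum_range_succ, TT_eq_zero (show n < 2 * (n + 1) from by omega)]
    simp
  rw [e2]
  rw [show n + 1 + 1 = n + 2 from rfl] at e1 ⊢
  omega

lemma invN_eq_SS : ∀ n, invN n = SS n := by
  intro n
  induction n using Nat.strong_induction_on with
  | _ n ih =>
    match n with
    | 0 => simp [invN, SS_zero]
    | 1 => simp [invN, SS_one]
    | n + 2 =>
      rw [invN, ih (n + 1) (by omega), ih n (by omega), SS_rec]

-- the half-range sum the port computes equals the full-range sum
lemma sum_half_eq_SS (n : Nat) :
    (∑ k ∈ Finset.range (n / 2 + 1), TT n k) = SS n := by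
  unfold SS
  apply Finset.sum_subset
  · intro k hk
    simp only [Finset.mem_range] at *
    omega
  · intro k hk hk2
    simp only [Finset.mem_range] at *
    exact TT_eq_zero (by omega)

-- B's loop invariant
lemma loopB (n : Nat) (_hn : 2 ≤ n) : ∀ M : Nat, M ≤ n / 2 →
    ((PySem.List.pyRange 1 ((M : Int) + 1) 1).foldl
      (fun (p : Int × Int) k =>
        let term := PySem.Int.floordiv (p.2 * ((n : Int) - 2 * k + 2) * ((n : Int) - 2 * k + 1)) (2 * k)
        (p.1 + term, term)) (1, 1))
    = (((∑ k ∈ Finset.range (M + 1), TT n k : Nat) : Int), ((TT n M : Nat) : Int)) := by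
  intro M
  induction M with
  | zero =>
    intro _
    rw [PySem.List.pyRange_one_eq_nil (by norm_num)]
    simp [TT_zero]
  | succ M ih =>
    intro hM
    have hM' : M ≤ n / 2 := by omega
    have hle : 2 * M + 2 ≤ n := by omega
    have hcast : (((M + 1 : Nat)) : Int) + 1 = ((M : Int) + 1) + 1 := by push_cast; ring
    rw [hcast, PySem.List.pyRange_one_succ_right (by omega : (1 : Int) ≤ (M : Int) + 1),
      List.foldl_append, ih hM']
    have hstep := TT_step n M
    have hz : ((TT n M : Nat) : Int) * ((n : Int) - 2 * ((M : Int) + 1) + 2)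
        * ((n : Int) - 2 * ((M : Int) + 1) + 1) = 2 * ((M : Int) + 1) * ((TT n (M + 1) : Nat) : Int) := by
      zify [show 2 * M ≤ n from by omega, show 1 ≤ n - 2 * M from by omega] at hstep
      linear_combination hstep
    have hdiv : PySem.Int.floordiv
        (((TT n M : Nat) : Int) * ((n : Int) - 2 * ((M : Int) + 1) + 2)
          * ((n : Int) - 2 * ((M : Int) + 1) + 1)) (2 * ((M : Int) + 1))
        = ((TT n (M + 1) : Nat) : Int) := by
      rw [hz, PySem.Int.floordiv_eq_ediv_of_pos (by positivity),
        Int.mul_ediv_cancel_left _ (by positivity)]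
    simp only [List.foldl_cons, List.foldl_nil]
    rw [hdiv]
    simp only [Prod.mk.injEq]
    refine ⟨?_, trivial⟩
    rw [Finset.sum_range_succ (fun k => TT n k) (M + 1)]
    push_cast
    ring


-- A's loop invariant
lemma loopA (n : Nat) : ∀ f m : Nat, m + f = n →
    involutionLoop (n : Int) f (1 :: (List.range (m + 1)).map (fun p => (invN p : Int)))
      ((m : Int) + 1) (m : Int) (m : Int)
    = 1 :: (List.range (n + 1)).map (fun p => (invN p : Int)) := by
  intro f
  induction f with
  | zero =>
    intro m hm
    obtain rfl : m = n := by omega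
    rfl
  | succ f ih =>
    intro m hm
    have hlt : (m : Int) < (n : Int) := by exact_mod_cast (show m < n from by omega)
    simp only [involutionLoop]
    rw [if_pos hlt]
    have hget1 : PySem.List.pyGetD (1 :: (List.range (m + 1)).map (fun p => (invN p : Int))) ((m : Int) + 1) 0
        = (invN m : Int) := by
      rw [show ((m : Int) + 1) = (((m + 1 : Nat)) : Int) from by push_cast; ring,
        PySem.List.pyGetD_natCast, List.getD_cons_succ]
      simp [List.getD_eq_getElem?_getD]
    have hv : PySem.List.pyGetD (1 :: (List.range (m + 1)).map (fun p => (invN p : Int))) ((m : Int) + 1) 0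
        + (m : Int) * PySem.List.pyGetD (1 :: (List.range (m + 1)).map (fun p => (invN p : Int))) (m : Int) 0
        = (invN (m + 1) : Int) := by
      rw [hget1]
      match m with
      | 0 => simp [invN]
      | m' + 1 =>
        have hget2 : PySem.List.pyGetD (1 :: (List.range (m' + 2)).map (fun p => (invN p : Int))) ((m' + 1 : Nat) : Int) 0
            = (invN m' : Int) := by
          rw [PySem.List.pyGetD_natCast, List.getD_cons_succ]
          simp [List.getD_eq_getElem?_getD]
        rw [hget2, show invN (m' + 1 + 1) = invN (m' + 1) + (m' + 1) * invN m' from rfl]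
        push_cast
        ring
    rw [hv]
    have hlist : (1 :: (List.range (m + 1)).map (fun p => (invN p : Int))) ++ [(invN (m + 1) : Int)]
        = 1 :: (List.range (m + 1 + 1)).map (fun p => (invN p : Int)) := by
      rw [List.range_succ (n := m + 1), List.map_append]
      rfl
    rw [hlist]
    have := ih (m + 1) (by omega)
    push_cast at this ⊢
    convert this using 2


lemma involution_eq_invN (num : Int) (h2 : 2 ≤ num) : involution num = (invN num.toNat : Int) := by
  obtain ⟨n, rfl⟩ : ∃ n : Nat, num = (n : Int) := ⟨num.toNat, by omega⟩
  have hn : 2 ≤ n := by exact_mod_cast h2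
  unfold involution
  rw [if_neg (by simp; omega)]
  have h0 := loopA n n 0 (by omega)
  norm_num [invN] at h0
  rw [Int.toNat_natCast, h0]
  have hsplit : (1 : Int) :: (List.range (n + 1)).map (fun p => (invN p : Int))
      = ((1 : Int) :: (List.range n).map (fun p => (invN p : Int))) ++ [(invN n : Int)] := by
    rw [List.range_succ, List.map_append]
    rfl
  rw [hsplit, PySem.List.pyGetD_neg_one_append_singleton]

lemma involution_alt_eq_invN (num : Int) (h2 : 2 ≤ num) : involution_alt num = (invN num.toNat : Int) := by
  obtain ⟨n, rfl⟩ : ∃ n : Nat, num = (n : Int) := ⟨num.toNat, by omega⟩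
  have hn : 2 ≤ n := by exact_mod_cast h2
  unfold involution_alt
  rw [if_neg (by omega)]
  have hfd : PySem.Int.floordiv ((n : Int)) 2 = ((n / 2 : Nat) : Int) := by
    exact_mod_cast PySem.Int.floordiv_natCast n 2
  rw [hfd, loopB n hn (n / 2) le_rfl, Int.toNat_natCast, invN_eq_SS, ← sum_half_eq_SS]

-- ===== VERDICT (by name: the statement is the Claim_ definition above) =====
theorem involution_spec : Claim_equal_involution := by
  intro num _
  unfold Spec_involution
  by_cases h2 : 2 ≤ num
  · rw [involution_eq_invN num h2, involution_alt_eq_invN num h2]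
  · unfold involution involution_alt
    rw [if_pos (by omega : num < 2)]
    by_cases h0 : num == 0 || num == 1
    · rw [if_pos h0]
    · rw [if_neg h0]
      have ht : num.toNat = 0 := by
        simp only [beq_iff_eq, Bool.or_eq_true, not_or] at h0
        omega
      rw [ht]
      simp [involutionLoop, PySem.List.pyGetD, PySem.List.pyGet?, PySem.List.pyIdx?]
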